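-- pv_equiv track=rewrite | github.com/GopiBalach/under_grad | app.py | recommend_field
-- ===== SOURCE A (Python) =====
-- def recommend_field(skills: list) -> str:
--     fields = {
--         "Data Science": {"Python","Machine Learning","Data Analysis","SQL","Pandas","NumPy","scikit-learn","TensorFlow"},
--         "Web Development": {"JavaScript","HTML","CSS","React","Node.js","Angular","Vue.js"},
--         "Android Development": {"Java","Kotlin","Android SDK"},
--         "iOS Development": {"Swift","Objective-C","iOS"},
--         "UI/UX Design": {"Figma","Adobe XD","Sketch","User Research"}
--     }
--     best = "General Software Development"
--     best_match = 0
--     sset = set(skills)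
--     for field, reqs in fields.items():
--         score = len(sset & reqs)
--         if score > best_match:
--             best_match = score
--             best = field
--     return best
-- ===== SOURCE B (Python) =====
-- _INDEX = {
--     "Python": "Data Science", "Machine Learning": "Data Science",
--     "Data Analysis": "Data Science", "SQL": "Data Science",
--     "Pandas": "Data Science", "NumPy": "Data Science",
--     "scikit-learn": "Data Science", "TensorFlow": "Data Science",
--     "JavaScript": "Web Development", "HTML": "Web Development",
--     "CSS": "Web Development", "React": "Web Development",
--     "Node.js": "Web Development", "Angular": "Web Development",
--     "Vue.js": "Web Development",
--     "Java": "Android Development", "Kotlin": "Android Development",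
--     "Android SDK": "Android Development",
--     "Swift": "iOS Development", "Objective-C": "iOS Development",
--     "iOS": "iOS Development",
--     "Figma": "UI/UX Design", "Adobe XD": "UI/UX Design",
--     "Sketch": "UI/UX Design", "User Research": "UI/UX Design",
-- }
-- _ORDER = ["Data Science", "Web Development", "Android Development",
--           "iOS Development", "UI/UX Design"]
--
-- def recommend_field(skills: list) -> str:
--     # count distinct input skills per field via the inverted skill->field index
--     counts = {f: 0 for f in _ORDER}
--     for s in set(skills):
--         f = _INDEX.get(s)
--         if f is not None:
--             counts[f] += 1
--     m = max(counts[f] for f in _ORDER)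
--     if m == 0:
--         return "General Software Development"
--     for f in _ORDER:
--         if counts[f] == m:
--             return f
-- ===== Notes on version B (the rewrite author's own statement) =====
-- stated objective: alternative
-- what changed: Replaces the per-field set-intersection scoring loop with a literal inverted skill-to-field index and one counting pass over the deduped input skills, then selects by computing the maximum count first and returning the first field (in declaration order) that attains it, defaulting when the maximum is 0.
import Mathlib
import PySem

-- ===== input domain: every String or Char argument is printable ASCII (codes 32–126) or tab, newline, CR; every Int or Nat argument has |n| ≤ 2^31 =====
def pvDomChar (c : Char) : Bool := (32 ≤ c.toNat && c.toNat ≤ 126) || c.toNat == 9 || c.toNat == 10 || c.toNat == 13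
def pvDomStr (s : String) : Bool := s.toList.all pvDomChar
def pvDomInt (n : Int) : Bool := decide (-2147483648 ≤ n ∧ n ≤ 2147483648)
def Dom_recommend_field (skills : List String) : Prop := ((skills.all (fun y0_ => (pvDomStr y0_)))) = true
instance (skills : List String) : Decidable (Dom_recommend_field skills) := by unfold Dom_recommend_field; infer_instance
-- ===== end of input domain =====

-- B replaces A's per-field set-intersection scoring loop with a literal inverted
-- skill→field index, one counting pass over the deduped input skills, and a
-- max-then-first-match selection (objective: alternative decomposition).

-- ===== PORT A =====
def pvFieldsA : List (String × List String) :=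
  [("Data Science", ["Python", "Machine Learning", "Data Analysis", "SQL", "Pandas", "NumPy", "scikit-learn", "TensorFlow"]),
   ("Web Development", ["JavaScript", "HTML", "CSS", "React", "Node.js", "Angular", "Vue.js"]),
   ("Android Development", ["Java", "Kotlin", "Android SDK"]),
   ("iOS Development", ["Swift", "Objective-C", "iOS"]),
   ("UI/UX Design", ["Figma", "Adobe XD", "Sketch", "User Research"])]

def recommend_field (skills : List String) : String :=
  let sset : PySem.Set String := PySem.Set.ofList skills
  (pvFieldsA.foldl
    (fun (st : String × Int) fr =>
      let score : Int := PySem.Set.len (PySem.Set.inter sset (PySem.Set.ofList fr.2))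
      if st.2 < score then (fr.1, score) else st)
    ("General Software Development", 0)).1

-- ===== PORT B =====
-- the module-level inverted index _INDEX of Source B, a literal dict
def pvIndex : PySem.Dict String String := PySem.Dict.mk
  [("Python","Data Science"),("Machine Learning","Data Science"),("Data Analysis","Data Science"),
   ("SQL","Data Science"),("Pandas","Data Science"),("NumPy","Data Science"),
   ("scikit-learn","Data Science"),("TensorFlow","Data Science"),
   ("JavaScript","Web Development"),("HTML","Web Development"),("CSS","Web Development"),
   ("React","Web Development"),("Node.js","Web Development"),("Angular","Web Development"),
   ("Vue.js","Web Development"),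
   ("Java","Android Development"),("Kotlin","Android Development"),("Android SDK","Android Development"),
   ("Swift","iOS Development"),("Objective-C","iOS Development"),("iOS","iOS Development"),
   ("Figma","UI/UX Design"),("Adobe XD","UI/UX Design"),("Sketch","UI/UX Design"),
   ("User Research","UI/UX Design")]

-- the module-level list _ORDER of Source B
def pvOrder : List String :=
  ["Data Science", "Web Development", "Android Development", "iOS Development", "UI/UX Design"]

def recommend_field_alt (skills : List String) : String :=
  -- counts = {f: 0 for f in _ORDER}
  let counts0 : PySem.Dict String Int :=
    pvOrder.foldl (fun d f => d.insert f 0) PySem.Dict.empty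
  -- one pass over set(skills); counting is order-independent, so iterating the
  -- distinct elements in first-occurrence order is exact
  let counts : PySem.Dict String Int :=
    (PySem.Set.ofList skills).foldl
      (fun d s =>
        match pvIndex.get? s with
        | some f => d.insert f (d.getD f 0 + 1)
        | none => d)
      counts0
  -- m = max(counts[f] for f in _ORDER); the generator is nonempty so max never raises
  let m : Int := (PySem.List.max? (pvOrder.map (fun f => counts.getD f 0)) (fun x => x)).getD 0
  if m == 0 then "General Software Development"
  else
    -- for f in _ORDER: if counts[f] == m: return f — ported as find?; the loop's
    -- fallthrough is unreachable (m is one of the counts), getD supplies a default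
    (pvOrder.find? (fun f => counts.getD f 0 == m)).getD "General Software Development"

-- ===== PRECONDITION & SPEC =====
def Spec_recommend_field (skills : List String) (out : String) : Prop := out = recommend_field_alt skills
instance (skills : List String) (out : String) : Decidable (Spec_recommend_field skills out) := by unfold Spec_recommend_field; infer_instance

-- ===== CLAIM (what is proved, stated in full; the proofs are below) =====
def Claim_equal_recommend_field : Prop := ∀ (skills : List String), Dom_recommend_field skills → Spec_recommend_field skills (recommend_field skills)

-- ===== LEMMAS AND PROOFS =====

-- number of distinct input skills belonging to requirement list R
def pvCnt (R : List String) (skills : List String) : Int :=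
  (((PySem.Set.ofList skills).filter (fun x => R.contains x)).length : Int)

-- A's selection as a function of the five scores
def pvPickA (c1 c2 c3 c4 c5 : Int) : String :=
  (([("Data Science", c1), ("Web Development", c2), ("Android Development", c3),
     ("iOS Development", c4), ("UI/UX Design", c5)].foldl
      (fun (st : String × Int) fr => if st.2 < fr.2 then fr else st)
      ("General Software Development", 0))).1

-- B's selection as a function of the five counts
def pvPickB (c1 c2 c3 c4 c5 : Int) : String :=
  if max (max (max (max c1 c2) c3) c4) c5 == 0 then "General Software Development"
  else if c1 == max (max (max (max c1 c2) c3) c4) c5 then "Data Science"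
  else if c2 == max (max (max (max c1 c2) c3) c4) c5 then "Web Development"
  else if c3 == max (max (max (max c1 c2) c3) c4) c5 then "Android Development"
  else if c4 == max (max (max (max c1 c2) c3) c4) c5 then "iOS Development"
  else if c5 == max (max (max (max c1 c2) c3) c4) c5 then "UI/UX Design"
  else "General Software Development"

-- the count dict B builds: getD is a countP over the traversed skills
lemma pvCounts_getD (l : List String) (d : PySem.Dict String Int) (f : String) :
    (l.foldl
      (fun d s =>
        match pvIndex.get? s with
        | some k => d.insert k (d.getD k 0 + 1)
        | none => d) d).getD f 0
    = d.getD f 0 + (l.countP (fun s => pvIndex.get? s == some f) : Int) := by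
  induction l generalizing d with
  | nil => simp
  | cons s t ih =>
    simp only [List.foldl_cons, List.countP_cons]
    cases h : pvIndex.get? s with
    | none => rw [ih]; simp
    | some k =>
      rw [ih, PySem.Dict.getD_insert]
      by_cases hk : f = k
      · subst hk; simp; ring
      · have hk2 : ¬k = f := Ne.symm hk
        simp [hk, hk2]

-- the zero-initialised dict looks up 0 for every key
lemma pv_zero_getD (f : String) :
    (PySem.Dict.mk [("Data Science",(0:Int)),("Web Development",0),("Android Development",0),
                    ("iOS Development",0),("UI/UX Design",0)]).getD f 0 = 0 := by
  simp only [PySem.Dict.getD, PySem.Dict.get?_mk_cons]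
  split_ifs <;> rfl

set_option maxHeartbeats 2000000 in
lemma pv_pw1 (s : String) : (pvIndex.get? s == some "Data Science")
    = (["Python", "Machine Learning", "Data Analysis", "SQL", "Pandas", "NumPy", "scikit-learn", "TensorFlow"] : List String).contains s := by
  simp only [pvIndex, PySem.Dict.get?_mk_cons]
  by_cases h1 : s = "Python"
  · subst h1; decide
  by_cases h2 : s = "Machine Learning"
  · subst h2; decide
  by_cases h3 : s = "Data Analysis"
  · subst h3; decide
  by_cases h4 : s = "SQL"
  · subst h4; decide
  by_cases h5 : s = "Pandas"
  · subst h5; decide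
  by_cases h6 : s = "NumPy"
  · subst h6; decide
  by_cases h7 : s = "scikit-learn"
  · subst h7; decide
  by_cases h8 : s = "TensorFlow"
  · subst h8; decide
  by_cases h9 : s = "JavaScript"
  · subst h9; decide
  by_cases h10 : s = "HTML"
  · subst h10; decide
  by_cases h11 : s = "CSS"
  · subst h11; decide
  by_cases h12 : s = "React"
  · subst h12; decide
  by_cases h13 : s = "Node.js"
  · subst h13; decide
  by_cases h14 : s = "Angular"
  · subst h14; decide
  by_cases h15 : s = "Vue.js"
  · subst h15; decide
  by_cases h16 : s = "Java"
  · subst h16; decide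
  by_cases h17 : s = "Kotlin"
  · subst h17; decide
  by_cases h18 : s = "Android SDK"
  · subst h18; decide
  by_cases h19 : s = "Swift"
  · subst h19; decide
  by_cases h20 : s = "Objective-C"
  · subst h20; decide
  by_cases h21 : s = "iOS"
  · subst h21; decide
  by_cases h22 : s = "Figma"
  · subst h22; decide
  by_cases h23 : s = "Adobe XD"
  · subst h23; decide
  by_cases h24 : s = "Sketch"
  · subst h24; decide
  by_cases h25 : s = "User Research"
  · subst h25; decide
  have e1 : ("Python" == s) = false := by simp [Ne.symm h1]
  have e2 : ("Machine Learning" == s) = false := by simp [Ne.symm h2]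
  have e3 : ("Data Analysis" == s) = false := by simp [Ne.symm h3]
  have e4 : ("SQL" == s) = false := by simp [Ne.symm h4]
  have e5 : ("Pandas" == s) = false := by simp [Ne.symm h5]
  have e6 : ("NumPy" == s) = false := by simp [Ne.symm h6]
  have e7 : ("scikit-learn" == s) = false := by simp [Ne.symm h7]
  have e8 : ("TensorFlow" == s) = false := by simp [Ne.symm h8]
  have e9 : ("JavaScript" == s) = false := by simp [Ne.symm h9]
  have e10 : ("HTML" == s) = false := by simp [Ne.symm h10]
  have e11 : ("CSS" == s) = false := by simp [Ne.symm h11]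
  have e12 : ("React" == s) = false := by simp [Ne.symm h12]
  have e13 : ("Node.js" == s) = false := by simp [Ne.symm h13]
  have e14 : ("Angular" == s) = false := by simp [Ne.symm h14]
  have e15 : ("Vue.js" == s) = false := by simp [Ne.symm h15]
  have e16 : ("Java" == s) = false := by simp [Ne.symm h16]
  have e17 : ("Kotlin" == s) = false := by simp [Ne.symm h17]
  have e18 : ("Android SDK" == s) = false := by simp [Ne.symm h18]
  have e19 : ("Swift" == s) = false := by simp [Ne.symm h19]
  have e20 : ("Objective-C" == s) = false := by simp [Ne.symm h20]
  have e21 : ("iOS" == s) = false := by simp [Ne.symm h21]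
  have e22 : ("Figma" == s) = false := by simp [Ne.symm h22]
  have e23 : ("Adobe XD" == s) = false := by simp [Ne.symm h23]
  have e24 : ("Sketch" == s) = false := by simp [Ne.symm h24]
  have e25 : ("User Research" == s) = false := by simp [Ne.symm h25]
  simp only [e1, e2, e3, e4, e5, e6, e7, e8, e9, e10, e11, e12, e13, e14, e15, e16, e17, e18, e19, e20, e21, e22, e23, e24, e25, Bool.false_eq_true, if_false]
  have hE : (PySem.Dict.mk ([] : List (String × String))).get? s = none := rfl
  rw [hE, show ∀ f : String, ((none : Option String) == some f) = false from fun _ => rfl]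
  symm
  rw [← Bool.not_eq_true, List.contains_iff_mem]
  intro hc
  simp only [List.mem_cons, List.not_mem_nil, or_false] at hc
  obtain rfl|rfl|rfl|rfl|rfl|rfl|rfl|rfl := hc <;> simp_all

set_option maxHeartbeats 2000000 in
lemma pv_pw2 (s : String) : (pvIndex.get? s == some "Web Development")
    = (["JavaScript", "HTML", "CSS", "React", "Node.js", "Angular", "Vue.js"] : List String).contains s := by
  simp only [pvIndex, PySem.Dict.get?_mk_cons]
  by_cases h1 : s = "Python"
  · subst h1; decide
  by_cases h2 : s = "Machine Learning"
  · subst h2; decide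
  by_cases h3 : s = "Data Analysis"
  · subst h3; decide
  by_cases h4 : s = "SQL"
  · subst h4; decide
  by_cases h5 : s = "Pandas"
  · subst h5; decide
  by_cases h6 : s = "NumPy"
  · subst h6; decide
  by_cases h7 : s = "scikit-learn"
  · subst h7; decide
  by_cases h8 : s = "TensorFlow"
  · subst h8; decide
  by_cases h9 : s = "JavaScript"
  · subst h9; decide
  by_cases h10 : s = "HTML"
  · subst h10; decide
  by_cases h11 : s = "CSS"
  · subst h11; decide
  by_cases h12 : s = "React"
  · subst h12; decide
  by_cases h13 : s = "Node.js"
  · subst h13; decide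
  by_cases h14 : s = "Angular"
  · subst h14; decide
  by_cases h15 : s = "Vue.js"
  · subst h15; decide
  by_cases h16 : s = "Java"
  · subst h16; decide
  by_cases h17 : s = "Kotlin"
  · subst h17; decide
  by_cases h18 : s = "Android SDK"
  · subst h18; decide
  by_cases h19 : s = "Swift"
  · subst h19; decide
  by_cases h20 : s = "Objective-C"
  · subst h20; decide
  by_cases h21 : s = "iOS"
  · subst h21; decide
  by_cases h22 : s = "Figma"
  · subst h22; decide
  by_cases h23 : s = "Adobe XD"
  · subst h23; decide
  by_cases h24 : s = "Sketch"
  · subst h24; decide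
  by_cases h25 : s = "User Research"
  · subst h25; decide
  have e1 : ("Python" == s) = false := by simp [Ne.symm h1]
  have e2 : ("Machine Learning" == s) = false := by simp [Ne.symm h2]
  have e3 : ("Data Analysis" == s) = false := by simp [Ne.symm h3]
  have e4 : ("SQL" == s) = false := by simp [Ne.symm h4]
  have e5 : ("Pandas" == s) = false := by simp [Ne.symm h5]
  have e6 : ("NumPy" == s) = false := by simp [Ne.symm h6]
  have e7 : ("scikit-learn" == s) = false := by simp [Ne.symm h7]
  have e8 : ("TensorFlow" == s) = false := by simp [Ne.symm h8]
  have e9 : ("JavaScript" == s) = false := by simp [Ne.symm h9]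
  have e10 : ("HTML" == s) = false := by simp [Ne.symm h10]
  have e11 : ("CSS" == s) = false := by simp [Ne.symm h11]
  have e12 : ("React" == s) = false := by simp [Ne.symm h12]
  have e13 : ("Node.js" == s) = false := by simp [Ne.symm h13]
  have e14 : ("Angular" == s) = false := by simp [Ne.symm h14]
  have e15 : ("Vue.js" == s) = false := by simp [Ne.symm h15]
  have e16 : ("Java" == s) = false := by simp [Ne.symm h16]
  have e17 : ("Kotlin" == s) = false := by simp [Ne.symm h17]
  have e18 : ("Android SDK" == s) = false := by simp [Ne.symm h18]
  have e19 : ("Swift" == s) = false := by simp [Ne.symm h19]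
  have e20 : ("Objective-C" == s) = false := by simp [Ne.symm h20]
  have e21 : ("iOS" == s) = false := by simp [Ne.symm h21]
  have e22 : ("Figma" == s) = false := by simp [Ne.symm h22]
  have e23 : ("Adobe XD" == s) = false := by simp [Ne.symm h23]
  have e24 : ("Sketch" == s) = false := by simp [Ne.symm h24]
  have e25 : ("User Research" == s) = false := by simp [Ne.symm h25]
  simp only [e1, e2, e3, e4, e5, e6, e7, e8, e9, e10, e11, e12, e13, e14, e15, e16, e17, e18, e19, e20, e21, e22, e23, e24, e25, Bool.false_eq_true, if_false]
  have hE : (PySem.Dict.mk ([] : List (String × String))).get? s = none := rfl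
  rw [hE, show ∀ f : String, ((none : Option String) == some f) = false from fun _ => rfl]
  symm
  rw [← Bool.not_eq_true, List.contains_iff_mem]
  intro hc
  simp only [List.mem_cons, List.not_mem_nil, or_false] at hc
  obtain rfl|rfl|rfl|rfl|rfl|rfl|rfl := hc <;> simp_all

set_option maxHeartbeats 2000000 in
lemma pv_pw3 (s : String) : (pvIndex.get? s == some "Android Development")
    = (["Java", "Kotlin", "Android SDK"] : List String).contains s := by
  simp only [pvIndex, PySem.Dict.get?_mk_cons]
  by_cases h1 : s = "Python"
  · subst h1; decide
  by_cases h2 : s = "Machine Learning"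
  · subst h2; decide
  by_cases h3 : s = "Data Analysis"
  · subst h3; decide
  by_cases h4 : s = "SQL"
  · subst h4; decide
  by_cases h5 : s = "Pandas"
  · subst h5; decide
  by_cases h6 : s = "NumPy"
  · subst h6; decide
  by_cases h7 : s = "scikit-learn"
  · subst h7; decide
  by_cases h8 : s = "TensorFlow"
  · subst h8; decide
  by_cases h9 : s = "JavaScript"
  · subst h9; decide
  by_cases h10 : s = "HTML"
  · subst h10; decide
  by_cases h11 : s = "CSS"
  · subst h11; decide
  by_cases h12 : s = "React"
  · subst h12; decide
  by_cases h13 : s = "Node.js"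
  · subst h13; decide
  by_cases h14 : s = "Angular"
  · subst h14; decide
  by_cases h15 : s = "Vue.js"
  · subst h15; decide
  by_cases h16 : s = "Java"
  · subst h16; decide
  by_cases h17 : s = "Kotlin"
  · subst h17; decide
  by_cases h18 : s = "Android SDK"
  · subst h18; decide
  by_cases h19 : s = "Swift"
  · subst h19; decide
  by_cases h20 : s = "Objective-C"
  · subst h20; decide
  by_cases h21 : s = "iOS"
  · subst h21; decide
  by_cases h22 : s = "Figma"
  · subst h22; decide
  by_cases h23 : s = "Adobe XD"
  · subst h23; decide
  by_cases h24 : s = "Sketch"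
  · subst h24; decide
  by_cases h25 : s = "User Research"
  · subst h25; decide
  have e1 : ("Python" == s) = false := by simp [Ne.symm h1]
  have e2 : ("Machine Learning" == s) = false := by simp [Ne.symm h2]
  have e3 : ("Data Analysis" == s) = false := by simp [Ne.symm h3]
  have e4 : ("SQL" == s) = false := by simp [Ne.symm h4]
  have e5 : ("Pandas" == s) = false := by simp [Ne.symm h5]
  have e6 : ("NumPy" == s) = false := by simp [Ne.symm h6]
  have e7 : ("scikit-learn" == s) = false := by simp [Ne.symm h7]
  have e8 : ("TensorFlow" == s) = false := by simp [Ne.symm h8]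
  have e9 : ("JavaScript" == s) = false := by simp [Ne.symm h9]
  have e10 : ("HTML" == s) = false := by simp [Ne.symm h10]
  have e11 : ("CSS" == s) = false := by simp [Ne.symm h11]
  have e12 : ("React" == s) = false := by simp [Ne.symm h12]
  have e13 : ("Node.js" == s) = false := by simp [Ne.symm h13]
  have e14 : ("Angular" == s) = false := by simp [Ne.symm h14]
  have e15 : ("Vue.js" == s) = false := by simp [Ne.symm h15]
  have e16 : ("Java" == s) = false := by simp [Ne.symm h16]
  have e17 : ("Kotlin" == s) = false := by simp [Ne.symm h17]
  have e18 : ("Android SDK" == s) = false := by simp [Ne.symm h18]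
  have e19 : ("Swift" == s) = false := by simp [Ne.symm h19]
  have e20 : ("Objective-C" == s) = false := by simp [Ne.symm h20]
  have e21 : ("iOS" == s) = false := by simp [Ne.symm h21]
  have e22 : ("Figma" == s) = false := by simp [Ne.symm h22]
  have e23 : ("Adobe XD" == s) = false := by simp [Ne.symm h23]
  have e24 : ("Sketch" == s) = false := by simp [Ne.symm h24]
  have e25 : ("User Research" == s) = false := by simp [Ne.symm h25]
  simp only [e1, e2, e3, e4, e5, e6, e7, e8, e9, e10, e11, e12, e13, e14, e15, e16, e17, e18, e19, e20, e21, e22, e23, e24, e25, Bool.false_eq_true, if_false]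
  have hE : (PySem.Dict.mk ([] : List (String × String))).get? s = none := rfl
  rw [hE, show ∀ f : String, ((none : Option String) == some f) = false from fun _ => rfl]
  symm
  rw [← Bool.not_eq_true, List.contains_iff_mem]
  intro hc
  simp only [List.mem_cons, List.not_mem_nil, or_false] at hc
  obtain rfl|rfl|rfl := hc <;> simp_all

set_option maxHeartbeats 2000000 in
lemma pv_pw4 (s : String) : (pvIndex.get? s == some "iOS Development")
    = (["Swift", "Objective-C", "iOS"] : List String).contains s := by
  simp only [pvIndex, PySem.Dict.get?_mk_cons]
  by_cases h1 : s = "Python"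
  · subst h1; decide
  by_cases h2 : s = "Machine Learning"
  · subst h2; decide
  by_cases h3 : s = "Data Analysis"
  · subst h3; decide
  by_cases h4 : s = "SQL"
  · subst h4; decide
  by_cases h5 : s = "Pandas"
  · subst h5; decide
  by_cases h6 : s = "NumPy"
  · subst h6; decide
  by_cases h7 : s = "scikit-learn"
  · subst h7; decide
  by_cases h8 : s = "TensorFlow"
  · subst h8; decide
  by_cases h9 : s = "JavaScript"
  · subst h9; decide
  by_cases h10 : s = "HTML"
  · subst h10; decide
  by_cases h11 : s = "CSS"
  · subst h11; decide
  by_cases h12 : s = "React"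
  · subst h12; decide
  by_cases h13 : s = "Node.js"
  · subst h13; decide
  by_cases h14 : s = "Angular"
  · subst h14; decide
  by_cases h15 : s = "Vue.js"
  · subst h15; decide
  by_cases h16 : s = "Java"
  · subst h16; decide
  by_cases h17 : s = "Kotlin"
  · subst h17; decide
  by_cases h18 : s = "Android SDK"
  · subst h18; decide
  by_cases h19 : s = "Swift"
  · subst h19; decide
  by_cases h20 : s = "Objective-C"
  · subst h20; decide
  by_cases h21 : s = "iOS"
  · subst h21; decide
  by_cases h22 : s = "Figma"
  · subst h22; decide
  by_cases h23 : s = "Adobe XD"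
  · subst h23; decide
  by_cases h24 : s = "Sketch"
  · subst h24; decide
  by_cases h25 : s = "User Research"
  · subst h25; decide
  have e1 : ("Python" == s) = false := by simp [Ne.symm h1]
  have e2 : ("Machine Learning" == s) = false := by simp [Ne.symm h2]
  have e3 : ("Data Analysis" == s) = false := by simp [Ne.symm h3]
  have e4 : ("SQL" == s) = false := by simp [Ne.symm h4]
  have e5 : ("Pandas" == s) = false := by simp [Ne.symm h5]
  have e6 : ("NumPy" == s) = false := by simp [Ne.symm h6]
  have e7 : ("scikit-learn" == s) = false := by simp [Ne.symm h7]
  have e8 : ("TensorFlow" == s) = false := by simp [Ne.symm h8]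
  have e9 : ("JavaScript" == s) = false := by simp [Ne.symm h9]
  have e10 : ("HTML" == s) = false := by simp [Ne.symm h10]
  have e11 : ("CSS" == s) = false := by simp [Ne.symm h11]
  have e12 : ("React" == s) = false := by simp [Ne.symm h12]
  have e13 : ("Node.js" == s) = false := by simp [Ne.symm h13]
  have e14 : ("Angular" == s) = false := by simp [Ne.symm h14]
  have e15 : ("Vue.js" == s) = false := by simp [Ne.symm h15]
  have e16 : ("Java" == s) = false := by simp [Ne.symm h16]
  have e17 : ("Kotlin" == s) = false := by simp [Ne.symm h17]
  have e18 : ("Android SDK" == s) = false := by simp [Ne.symm h18]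
  have e19 : ("Swift" == s) = false := by simp [Ne.symm h19]
  have e20 : ("Objective-C" == s) = false := by simp [Ne.symm h20]
  have e21 : ("iOS" == s) = false := by simp [Ne.symm h21]
  have e22 : ("Figma" == s) = false := by simp [Ne.symm h22]
  have e23 : ("Adobe XD" == s) = false := by simp [Ne.symm h23]
  have e24 : ("Sketch" == s) = false := by simp [Ne.symm h24]
  have e25 : ("User Research" == s) = false := by simp [Ne.symm h25]
  simp only [e1, e2, e3, e4, e5, e6, e7, e8, e9, e10, e11, e12, e13, e14, e15, e16, e17, e18, e19, e20, e21, e22, e23, e24, e25, Bool.false_eq_true, if_false]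
  have hE : (PySem.Dict.mk ([] : List (String × String))).get? s = none := rfl
  rw [hE, show ∀ f : String, ((none : Option String) == some f) = false from fun _ => rfl]
  symm
  rw [← Bool.not_eq_true, List.contains_iff_mem]
  intro hc
  simp only [List.mem_cons, List.not_mem_nil, or_false] at hc
  obtain rfl|rfl|rfl := hc <;> simp_all

set_option maxHeartbeats 2000000 in
lemma pv_pw5 (s : String) : (pvIndex.get? s == some "UI/UX Design")
    = (["Figma", "Adobe XD", "Sketch", "User Research"] : List String).contains s := by
  simp only [pvIndex, PySem.Dict.get?_mk_cons]
  by_cases h1 : s = "Python"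
  · subst h1; decide
  by_cases h2 : s = "Machine Learning"
  · subst h2; decide
  by_cases h3 : s = "Data Analysis"
  · subst h3; decide
  by_cases h4 : s = "SQL"
  · subst h4; decide
  by_cases h5 : s = "Pandas"
  · subst h5; decide
  by_cases h6 : s = "NumPy"
  · subst h6; decide
  by_cases h7 : s = "scikit-learn"
  · subst h7; decide
  by_cases h8 : s = "TensorFlow"
  · subst h8; decide
  by_cases h9 : s = "JavaScript"
  · subst h9; decide
  by_cases h10 : s = "HTML"
  · subst h10; decide
  by_cases h11 : s = "CSS"
  · subst h11; decide
  by_cases h12 : s = "React"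
  · subst h12; decide
  by_cases h13 : s = "Node.js"
  · subst h13; decide
  by_cases h14 : s = "Angular"
  · subst h14; decide
  by_cases h15 : s = "Vue.js"
  · subst h15; decide
  by_cases h16 : s = "Java"
  · subst h16; decide
  by_cases h17 : s = "Kotlin"
  · subst h17; decide
  by_cases h18 : s = "Android SDK"
  · subst h18; decide
  by_cases h19 : s = "Swift"
  · subst h19; decide
  by_cases h20 : s = "Objective-C"
  · subst h20; decide
  by_cases h21 : s = "iOS"
  · subst h21; decide
  by_cases h22 : s = "Figma"
  · subst h22; decide
  by_cases h23 : s = "Adobe XD"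
  · subst h23; decide
  by_cases h24 : s = "Sketch"
  · subst h24; decide
  by_cases h25 : s = "User Research"
  · subst h25; decide
  have e1 : ("Python" == s) = false := by simp [Ne.symm h1]
  have e2 : ("Machine Learning" == s) = false := by simp [Ne.symm h2]
  have e3 : ("Data Analysis" == s) = false := by simp [Ne.symm h3]
  have e4 : ("SQL" == s) = false := by simp [Ne.symm h4]
  have e5 : ("Pandas" == s) = false := by simp [Ne.symm h5]
  have e6 : ("NumPy" == s) = false := by simp [Ne.symm h6]
  have e7 : ("scikit-learn" == s) = false := by simp [Ne.symm h7]
  have e8 : ("TensorFlow" == s) = false := by simp [Ne.symm h8]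
  have e9 : ("JavaScript" == s) = false := by simp [Ne.symm h9]
  have e10 : ("HTML" == s) = false := by simp [Ne.symm h10]
  have e11 : ("CSS" == s) = false := by simp [Ne.symm h11]
  have e12 : ("React" == s) = false := by simp [Ne.symm h12]
  have e13 : ("Node.js" == s) = false := by simp [Ne.symm h13]
  have e14 : ("Angular" == s) = false := by simp [Ne.symm h14]
  have e15 : ("Vue.js" == s) = false := by simp [Ne.symm h15]
  have e16 : ("Java" == s) = false := by simp [Ne.symm h16]
  have e17 : ("Kotlin" == s) = false := by simp [Ne.symm h17]
  have e18 : ("Android SDK" == s) = false := by simp [Ne.symm h18]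
  have e19 : ("Swift" == s) = false := by simp [Ne.symm h19]
  have e20 : ("Objective-C" == s) = false := by simp [Ne.symm h20]
  have e21 : ("iOS" == s) = false := by simp [Ne.symm h21]
  have e22 : ("Figma" == s) = false := by simp [Ne.symm h22]
  have e23 : ("Adobe XD" == s) = false := by simp [Ne.symm h23]
  have e24 : ("Sketch" == s) = false := by simp [Ne.symm h24]
  have e25 : ("User Research" == s) = false := by simp [Ne.symm h25]
  simp only [e1, e2, e3, e4, e5, e6, e7, e8, e9, e10, e11, e12, e13, e14, e15, e16, e17, e18, e19, e20, e21, e22, e23, e24, e25, Bool.false_eq_true, if_false]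
  have hE : (PySem.Dict.mk ([] : List (String × String))).get? s = none := rfl
  rw [hE, show ∀ f : String, ((none : Option String) == some f) = false from fun _ => rfl]
  symm
  rw [← Bool.not_eq_true, List.contains_iff_mem]
  intro hc
  simp only [List.mem_cons, List.not_mem_nil, or_false] at hc
  obtain rfl|rfl|rfl|rfl := hc <;> simp_all

-- A's score for a duplicate-free requirement list is pvCnt
lemma pv_score_eq (skills : List String) (R : List String) (hR : R.Nodup) :
    PySem.Set.len (PySem.Set.inter (PySem.Set.ofList skills) (PySem.Set.ofList R))
    = pvCnt R skills := by
  rw [PySem.Set.ofList_eq_self_of_nodup R hR]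
  simp [PySem.Set.len, PySem.Set.inter, pvCnt]

-- A computes pvPickA of the five pvCnt scores
lemma pv_A_char (skills : List String) :
    recommend_field skills = pvPickA (pvCnt (["Python", "Machine Learning", "Data Analysis", "SQL", "Pandas", "NumPy", "scikit-learn", "TensorFlow"] : List String) skills) (pvCnt (["JavaScript", "HTML", "CSS", "React", "Node.js", "Angular", "Vue.js"] : List String) skills) (pvCnt (["Java", "Kotlin", "Android SDK"] : List String) skills) (pvCnt (["Swift", "Objective-C", "iOS"] : List String) skills) (pvCnt (["Figma", "Adobe XD", "Sketch", "User Research"] : List String) skills) := by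
  unfold recommend_field pvFieldsA pvPickA
  simp only [List.foldl_cons, List.foldl_nil]
  rw [pv_score_eq skills _ (by decide), pv_score_eq skills _ (by decide),
      pv_score_eq skills _ (by decide), pv_score_eq skills _ (by decide),
      pv_score_eq skills _ (by decide)]

-- B computes pvPickB of the five per-field counts
lemma pv_B_char (skills : List String) :
    recommend_field_alt skills =
      pvPickB
        ((PySem.Set.ofList skills).countP (fun s => pvIndex.get? s == some "Data Science") : Int)
        ((PySem.Set.ofList skills).countP (fun s => pvIndex.get? s == some "Web Development") : Int)
        ((PySem.Set.ofList skills).countP (fun s => pvIndex.get? s == some "Android Development") : Int)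
        ((PySem.Set.ofList skills).countP (fun s => pvIndex.get? s == some "iOS Development") : Int)
        ((PySem.Set.ofList skills).countP (fun s => pvIndex.get? s == some "UI/UX Design") : Int) := by
  unfold recommend_field_alt
  have h0 : (pvOrder.foldl (fun d f => PySem.Dict.insert d f (0:Int)) PySem.Dict.empty)
      = PySem.Dict.mk [("Data Science",0),("Web Development",0),("Android Development",0),
                       ("iOS Development",0),("UI/UX Design",0)] := by decide
  rw [h0]
  simp only [pvCounts_getD, pv_zero_getD, zero_add]
  simp only [pvOrder, List.map_cons, List.map_nil]
  rw [PySem.List.max?_id_cons]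
  simp only [List.foldl_cons, List.foldl_nil, Option.getD_some,
             List.find?_cons, List.find?_nil]
  unfold pvPickB
  split_ifs <;> simp_all only [Bool.not_eq_true, Option.getD_some, Option.getD_none]

-- the two selection rules agree on nonnegative counts: A keeps the first field
-- whose score strictly exceeds the running best, which is exactly the first
-- field attaining the (nonzero) maximum
set_option maxHeartbeats 2000000 in
lemma pv_pick (c1 c2 c3 c4 c5 : Int) (H1 : 0 ≤ c1) (H2 : 0 ≤ c2) (H3 : 0 ≤ c3)
    (H4 : 0 ≤ c4) (H5 : 0 ≤ c5) :
    pvPickA c1 c2 c3 c4 c5 = pvPickB c1 c2 c3 c4 c5 := by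
  simp only [pvPickA, pvPickB, List.foldl_cons, List.foldl_nil, beq_iff_eq]
  split_ifs <;> first | rfl | omega

-- ===== VERDICT (by name: the statement is the Claim_ definition above) =====
theorem recommend_field_spec : Claim_equal_recommend_field := by
  intro skills _
  show recommend_field skills = recommend_field_alt skills
  rw [pv_A_char, pv_B_char]
  rw [funext pv_pw1, funext pv_pw2, funext pv_pw3, funext pv_pw4, funext pv_pw5]
  have hc : ∀ R : List String,
      ((List.countP (fun x => R.contains x) (PySem.Set.ofList skills) : Nat) : Int)
        = pvCnt R skills := by
    intro R
    simp [pvCnt, List.countP_eq_length_filter]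
  rw [hc, hc, hc, hc, hc]
  exact pv_pick _ _ _ _ _ (Int.natCast_nonneg _) (Int.natCast_nonneg _)
    (Int.natCast_nonneg _) (Int.natCast_nonneg _) (Int.natCast_nonneg _)
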